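-- pv_equiv track=rewrite | github.com/Shijeekhuu1201/autochess_bot | services/supporter_service.py | _resolve_role_names_for_tier
-- ===== SOURCE A (Python) =====
-- def _resolve_role_names_for_tier(
--
--     target_role_name: str | None,
--     tiers: tuple[tuple[int, str], ...],
-- ) -> set[str]:
--     if not target_role_name:
--         return set()
--
--     role_names = [role_name for _, role_name in tiers]
--     if target_role_name not in role_names:
--         return {target_role_name}
--
--     start_index = role_names.index(target_role_name)
--     return set(role_names[start_index:])
-- ===== SOURCE B (Python) =====
-- def _resolve_role_names_for_tier(
--     target_role_name,
--     tiers,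
-- ):
--     # One pass with a 'found' flag instead of list-build + membership + index + slice.
--     if not target_role_name:
--         return set()
--     found = False
--     result = set()
--     for _, role_name in tiers:
--         if role_name == target_role_name:
--             found = True
--         if found:
--             result.add(role_name)
--     if not found:
--         return {target_role_name}
--     return result
-- ===== Notes on version B (the rewrite author's own statement) =====
-- stated objective: simpler
-- what changed: Replaced the build-list / membership test / .index / slice / set() chain with a single pass over tiers maintaining a found flag and accumulating the result set.
import Mathlib
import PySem

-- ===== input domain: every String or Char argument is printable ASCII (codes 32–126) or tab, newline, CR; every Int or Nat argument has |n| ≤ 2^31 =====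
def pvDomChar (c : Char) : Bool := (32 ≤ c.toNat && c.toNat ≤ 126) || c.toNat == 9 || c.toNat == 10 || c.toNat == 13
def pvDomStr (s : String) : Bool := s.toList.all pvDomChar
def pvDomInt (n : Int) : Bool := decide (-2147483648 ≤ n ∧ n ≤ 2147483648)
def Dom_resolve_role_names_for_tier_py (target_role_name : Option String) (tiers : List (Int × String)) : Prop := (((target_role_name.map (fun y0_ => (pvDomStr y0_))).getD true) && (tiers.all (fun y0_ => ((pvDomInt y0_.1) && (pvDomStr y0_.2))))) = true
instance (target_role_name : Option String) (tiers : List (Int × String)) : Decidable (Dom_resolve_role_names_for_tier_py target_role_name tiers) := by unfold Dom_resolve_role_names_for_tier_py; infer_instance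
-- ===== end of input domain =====

-- B replaces A's list-build / membership / .index / slice / set() chain with one pass
-- over `tiers` keeping a found-flag and the accumulated set (objective: simpler).

-- ===== PORT A =====
def resolve_role_names_for_tier_py (target_role_name : Option String) (tiers : List (Int × String)) : List String :=
  match target_role_name with
  | none => PySem.Set.empty
  | some s =>
    if s = "" then PySem.Set.empty
    else
      let role_names := tiers.map (fun p => p.2)
      if ¬ role_names.contains s then PySem.Set.add PySem.Set.empty s
      else
        match PySem.List.index? role_names s with
        | some start_index => PySem.Set.ofList (PySem.List.slice role_names (some (start_index : Int)) none)
        | none => PySem.Set.empty  -- unreachable: branch guarantees membership (Python .index would raise)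

-- ===== PORT B =====
def resolve_role_names_for_tier_py_alt (target_role_name : Option String) (tiers : List (Int × String)) : List String :=
  match target_role_name with
  | none => PySem.Set.empty
  | some s =>
    if s = "" then PySem.Set.empty
    else
      let st := tiers.foldl (fun (st : Bool × PySem.Set String) p =>
        let found := st.1 || (p.2 == s)
        (found, if found then PySem.Set.add st.2 p.2 else st.2)) (false, PySem.Set.empty)
      if ¬ st.1 then PySem.Set.add PySem.Set.empty s
      else st.2

-- ===== PRECONDITION & SPEC =====
def Spec_resolve_role_names_for_tier_py (target_role_name : Option String) (tiers : List (Int × String)) (out : List String) : Prop := out = resolve_role_names_for_tier_py_alt target_role_name tiers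
instance (target_role_name : Option String) (tiers : List (Int × String)) (out : List String) : Decidable (Spec_resolve_role_names_for_tier_py target_role_name tiers out) := by unfold Spec_resolve_role_names_for_tier_py; infer_instance

-- ===== CLAIM (what is proved, stated in full; the proofs are below) =====
def Claim_equal_resolve_role_names_for_tier_py : Prop := ∀ (target_role_name : Option String) (tiers : List (Int × String)), Dom_resolve_role_names_for_tier_py target_role_name tiers → Spec_resolve_role_names_for_tier_py target_role_name tiers (resolve_role_names_for_tier_py target_role_name tiers)

-- ===== LEMMAS AND PROOFS =====

-- B's step function, named for the proofs.
def pvStep (s : String) (st : Bool × PySem.Set String) (p : Int × String) : Bool × PySem.Set String :=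
  let found := st.1 || (p.2 == s)
  (found, if found then PySem.Set.add st.2 p.2 else st.2)

-- once found, the fold just adds every remaining name
lemma pvFold_true (s : String) (l : List (Int × String)) (acc : PySem.Set String) :
    l.foldl (pvStep s) (true, acc) = (true, (l.map (fun p => p.2)).foldl PySem.Set.add acc) := by
  induction l generalizing acc with
  | nil => rfl
  | cons a l ih => simp [pvStep, ih]

-- the core of A equals the core of B, for any tier list
lemma pvCore (s : String) (l : List (Int × String)) :
    (if ¬ (l.map (fun p => p.2)).contains s then PySem.Set.add PySem.Set.empty s
     else
       match PySem.List.index? (l.map (fun p => p.2)) s with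
       | some i => PySem.Set.ofList (PySem.List.slice (l.map (fun p => p.2)) (some (i : Int)) none)
       | none => PySem.Set.empty)
    = (let st := l.foldl (pvStep s) (false, PySem.Set.empty)
       if ¬ st.1 then PySem.Set.add PySem.Set.empty s else st.2) := by
  induction l with
  | nil => simp
  | cons a l ih =>
    simp only [List.map_cons, List.foldl_cons]
    by_cases h : a.2 = s
    · -- target found at the head: index 0, slice is the whole list
      subst h
      rw [PySem.List.index?_cons_self]
      simp only [List.contains_cons, BEq.rfl, Bool.true_or, not_true_eq_false, if_false]
      have hstep : pvStep a.2 (false, PySem.Set.empty) a = (true, PySem.Set.add PySem.Set.empty a.2) := by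
        simp [pvStep]
      rw [hstep, pvFold_true]
      simp [PySem.Set.ofList_eq_foldl]
    · -- head differs from target: both sides reduce to the tail
      have hne : a.2 ≠ s := h
      have hstep : pvStep s (false, PySem.Set.empty) a = (false, PySem.Set.empty) := by
        simp [pvStep, hne]
      rw [hstep, ← ih]
      have hsa : (s == a.2) = false := by simp [Ne.symm hne]
      by_cases hm : (l.map (fun p => p.2)).contains s
      · have hmem : s ∈ l.map (fun p => p.2) := by simpa using hm
        obtain ⟨i, hi⟩ := Option.isSome_iff_exists.mp ((PySem.List.index?_isSome_iff _ _).mpr hmem)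
        simp only [List.contains_cons, hsa, Bool.false_or, hm, not_true_eq_false, if_false]
        rw [PySem.List.index?_cons_of_ne _ hne, hi]
        simp only [Option.map_some]
        rw [PySem.List.slice_from_natCast, PySem.List.slice_from_natCast]
        simp
      · have hcc : (a.2 :: l.map (fun p => p.2)).contains s = (l.map (fun p => p.2)).contains s := by
          simp only [List.contains_eq_mem, List.mem_cons, decide_eq_decide]
          constructor
          · intro h1
            rcases h1 with h1 | h1
            · exact absurd h1.symm hne
            · exact h1
          · exact Or.inr
        rw [hcc, if_pos hm, if_pos hm]

-- ===== VERDICT (by name: the statement is the Claim_ definition above) =====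
theorem resolve_role_names_for_tier_py_spec : Claim_equal_resolve_role_names_for_tier_py := by
  intro t tiers _
  unfold Spec_resolve_role_names_for_tier_py resolve_role_names_for_tier_py resolve_role_names_for_tier_py_alt
  cases t with
  | none => rfl
  | some s =>
    by_cases hs : s = ""
    · simp [hs]
    · simp only [hs, if_false]
      exact pvCore s tiers
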